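-- pv_equiv track=rewrite | github.com/AlexanderKroll/ESP | notebooks_and_code/additional_code/data_preprocessing.py | process_metabolites
-- ===== SOURCE A (Python) =====
-- digits = [str(i) + " " for i in range(1,100)] + ["a "]
--
-- def process_metabolites(metabolites_list):
--     for i in range(len(metabolites_list)):
--         met = metabolites_list[i]
--         if met[0:2] in digits:
--             met = met[2:]
--         elif met[0:3] in digits:
--             met = met[3:]
--
--         if met[-1] == "(":
--             met = met[:-1]
--
--         metabolites_list[i] = met
--     return(metabolites_list)
-- ===== SOURCE B (Python) =====
-- import re
--
-- _PREFIX = re.compile(r'^([1-9][0-9]?|a) ')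
--
-- def process_metabolites(metabolites_list):
--     for i, met in enumerate(metabolites_list):
--         met = _PREFIX.sub('', met, count=1)
--         if met.endswith('('):
--             met = met[:-1]
--         metabolites_list[i] = met
--     return metabolites_list
-- ===== Notes on version B (the rewrite author's own statement) =====
-- stated objective: idiomatic
-- what changed: B replaces A's precomputed 100-entry prefix table ('1 '...'99 ', 'a ') and its two slice-membership branches with a single anchored regex substitution re.sub(r'^([1-9][0-9]?|a) ', '', met) that matches the prefix character by character, and uses endswith for the trailing-paren check.
import Mathlib
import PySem

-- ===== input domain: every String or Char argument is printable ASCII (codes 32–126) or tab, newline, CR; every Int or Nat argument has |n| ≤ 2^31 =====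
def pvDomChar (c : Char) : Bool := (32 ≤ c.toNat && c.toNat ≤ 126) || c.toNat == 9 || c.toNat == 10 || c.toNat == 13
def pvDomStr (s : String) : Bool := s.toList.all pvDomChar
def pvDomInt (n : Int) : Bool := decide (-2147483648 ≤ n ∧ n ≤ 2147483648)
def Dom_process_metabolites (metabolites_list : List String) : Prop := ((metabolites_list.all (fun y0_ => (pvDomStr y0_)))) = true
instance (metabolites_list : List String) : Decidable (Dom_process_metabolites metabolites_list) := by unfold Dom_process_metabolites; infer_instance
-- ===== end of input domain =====

-- B replaces A's 100-entry precomputed prefix table and double slice-membership test by a direct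
-- character-level prefix matcher (a regex in Source B); equivalence is about the RETURN value (A also
-- mutates its argument in place; the Lean ports are pure).

-- ===== PORT A =====
-- digits = [str(i) + " " for i in range(1,100)] + ["a "], as lists of code points
def pvDigits : List (List Char) :=
  ((PySem.List.pyRange 1 100 1).map (fun i => (PySem.Int.toStr i).toList ++ [' '])) ++ [['a', ' ']]

-- the body of A's loop for one element
def pvStepA (met : String) : String :=
  let cs := met.toList
  let cs1 :=
    if PySem.List.slice cs (some 0) (some 2) ∈ pvDigits then PySem.List.slice cs (some 2) none
    else if PySem.List.slice cs (some 0) (some 3) ∈ pvDigits then PySem.List.slice cs (some 3) none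
    else cs
  let cs2 :=
    match PySem.List.pyGet? cs1 (-1) with
    | some c => if c = '(' then PySem.List.slice cs1 none (some (-1)) else cs1
    | none => cs1      -- met[-1] raises IndexError here in Python; excluded by Pre_
  String.ofList cs2

-- 'for i in range(len(l)): ... l[i] = met' rewrites each slot from its own old value only,
-- so the written-back list is a map over the elements
def process_metabolites (metabolites_list : List String) : List String :=
  metabolites_list.map pvStepA

-- ===== PORT B =====
def pvIsNZDigit (c : Char) : Bool := decide ('1' ≤ c ∧ c ≤ '9')
def pvIsDigit (c : Char) : Bool := decide ('0' ≤ c ∧ c ≤ '9')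

-- hand port (exact) of re.sub(r'^([1-9][0-9]?|a) ', '', met, count=1): anchored at the start,
-- try greedily two digits [1-9][0-9] then ' ', backtrack to one digit [1-9] then ' ', or 'a' then ' ';
-- on a match drop it, otherwise return the input unchanged
def pvSubPrefix (cs : List Char) : List Char :=
  match cs with
  | c1 :: rest =>
    if pvIsNZDigit c1 then
      match rest with
      | c2 :: c3 :: rest2 =>
        if pvIsDigit c2 && (c3 == ' ') then rest2
        else if c2 == ' ' then c3 :: rest2
        else cs
      | [c2] => if c2 == ' ' then [] else cs
      | [] => cs
    else if c1 == 'a' then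
      match rest with
      | c2 :: rest2 => if c2 == ' ' then rest2 else cs
      | [] => cs
    else cs
  | [] => cs

def pvStepB (met : String) : String :=
  let cs := pvSubPrefix met.toList
  let cs' := if PySem.Chars.endswith cs ['('] then PySem.List.slice cs none (some (-1)) else cs
  String.ofList cs'

def process_metabolites_alt (metabolites_list : List String) : List String :=
  metabolites_list.map pvStepB

-- ===== PRECONDITION & SPEC =====
-- the bare prefixes "1 " … "99 ", "a " (as code points), independent literal for Pre_
def pvBareChars : List (List Char) :=
  [['1', ' '],
   ['2', ' '],
   ['3', ' '],
   ['4', ' '],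
   ['5', ' '],
   ['6', ' '],
   ['7', ' '],
   ['8', ' '],
   ['9', ' '],
   ['1', '0', ' '],
   ['1', '1', ' '],
   ['1', '2', ' '],
   ['1', '3', ' '],
   ['1', '4', ' '],
   ['1', '5', ' '],
   ['1', '6', ' '],
   ['1', '7', ' '],
   ['1', '8', ' '],
   ['1', '9', ' '],
   ['2', '0', ' '],
   ['2', '1', ' '],
   ['2', '2', ' '],
   ['2', '3', ' '],
   ['2', '4', ' '],
   ['2', '5', ' '],
   ['2', '6', ' '],
   ['2', '7', ' '],
   ['2', '8', ' '],
   ['2', '9', ' '],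
   ['3', '0', ' '],
   ['3', '1', ' '],
   ['3', '2', ' '],
   ['3', '3', ' '],
   ['3', '4', ' '],
   ['3', '5', ' '],
   ['3', '6', ' '],
   ['3', '7', ' '],
   ['3', '8', ' '],
   ['3', '9', ' '],
   ['4', '0', ' '],
   ['4', '1', ' '],
   ['4', '2', ' '],
   ['4', '3', ' '],
   ['4', '4', ' '],
   ['4', '5', ' '],
   ['4', '6', ' '],
   ['4', '7', ' '],
   ['4', '8', ' '],
   ['4', '9', ' '],
   ['5', '0', ' '],
   ['5', '1', ' '],
   ['5', '2', ' '],
   ['5', '3', ' '],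
   ['5', '4', ' '],
   ['5', '5', ' '],
   ['5', '6', ' '],
   ['5', '7', ' '],
   ['5', '8', ' '],
   ['5', '9', ' '],
   ['6', '0', ' '],
   ['6', '1', ' '],
   ['6', '2', ' '],
   ['6', '3', ' '],
   ['6', '4', ' '],
   ['6', '5', ' '],
   ['6', '6', ' '],
   ['6', '7', ' '],
   ['6', '8', ' '],
   ['6', '9', ' '],
   ['7', '0', ' '],
   ['7', '1', ' '],
   ['7', '2', ' '],
   ['7', '3', ' '],
   ['7', '4', ' '],
   ['7', '5', ' '],
   ['7', '6', ' '],
   ['7', '7', ' '],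
   ['7', '8', ' '],
   ['7', '9', ' '],
   ['8', '0', ' '],
   ['8', '1', ' '],
   ['8', '2', ' '],
   ['8', '3', ' '],
   ['8', '4', ' '],
   ['8', '5', ' '],
   ['8', '6', ' '],
   ['8', '7', ' '],
   ['8', '8', ' '],
   ['8', '9', ' '],
   ['9', '0', ' '],
   ['9', '1', ' '],
   ['9', '2', ' '],
   ['9', '3', ' '],
   ['9', '4', ' '],
   ['9', '5', ' '],
   ['9', '6', ' '],
   ['9', '7', ' '],
   ['9', '8', ' '],
   ['9', '9', ' '],
   ['a', ' ']]

-- A raises IndexError at met[-1] exactly when an element is empty or is a bare prefix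
-- ("1 " … "99 ", "a "), which strips to the empty string; those inputs are excluded.
def Pre_process_metabolites (metabolites_list : List String) : Prop :=
  ∀ met ∈ metabolites_list, met.toList ≠ [] ∧ met.toList ∉ pvBareChars
instance (metabolites_list : List String) : Decidable (Pre_process_metabolites metabolites_list) := by
  unfold Pre_process_metabolites; infer_instance

def pvWitness_process_metabolites : List String := ["2 Oxoglutarate", "a D-Ribose(", "H2O", "10 FADH2("]

def Spec_process_metabolites (metabolites_list : List String) (out : List String) : Prop := out = process_metabolites_alt metabolites_list
instance (metabolites_list : List String) (out : List String) : Decidable (Spec_process_metabolites metabolites_list out) := by unfold Spec_process_metabolites; infer_instance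

-- ===== CLAIM (what is proved, stated in full; the proofs are below) =====
def Claim_equal_process_metabolites : Prop := ∀ (metabolites_list : List String), Dom_process_metabolites metabolites_list → Pre_process_metabolites metabolites_list → Spec_process_metabolites metabolites_list (process_metabolites metabolites_list)

-- ===== LEMMAS AND PROOFS =====

lemma pvDigits_eq : pvDigits = pvBareChars := by decide

lemma pv_nz_enum (c : Char) (h : pvIsNZDigit c = true) :
    c = '1' ∨ c = '2' ∨ c = '3' ∨ c = '4' ∨ c = '5' ∨ c = '6' ∨ c = '7' ∨ c = '8' ∨ c = '9' := by
  have hc : c = Char.ofNat c.toNat := (Char.ofNat_toNat c).symm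
  simp only [pvIsNZDigit, decide_eq_true_eq] at h
  have h1' : 49 ≤ c.toNat := h.1
  have h2' : c.toNat ≤ 57 := h.2
  rw [hc]
  generalize c.toNat = n at h1' h2' ⊢
  interval_cases n <;> decide

lemma pv_dg_enum (c : Char) (h : pvIsDigit c = true) :
    c = '0' ∨ c = '1' ∨ c = '2' ∨ c = '3' ∨ c = '4' ∨ c = '5' ∨ c = '6' ∨ c = '7' ∨ c = '8' ∨ c = '9' := by
  have hc : c = Char.ofNat c.toNat := (Char.ofNat_toNat c).symm
  simp only [pvIsDigit, decide_eq_true_eq] at h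
  have h1' : 48 ≤ c.toNat := h.1
  have h2' : c.toNat ≤ 57 := h.2
  rw [hc]
  generalize c.toNat = n at h1' h2' ⊢
  interval_cases n <;> decide

lemma pv_len_ge (cs : List Char) (h : cs ∈ pvDigits) : 2 ≤ cs.length := by
  rw [pvDigits_eq] at h
  have hall : pvBareChars.all (fun cs => decide (2 ≤ cs.length)) = true := by decide
  simpa using List.all_eq_true.mp hall cs h

lemma pv_mem2 (c1 c2 : Char) :
    ([c1, c2] ∈ pvDigits) ↔ ((pvIsNZDigit c1 = true ∨ c1 = 'a') ∧ c2 = ' ') := by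
  rw [pvDigits_eq]
  constructor
  · intro h
    simp [pvBareChars] at h
    rcases h with ⟨rfl,rfl⟩|⟨rfl,rfl⟩|⟨rfl,rfl⟩|⟨rfl,rfl⟩|⟨rfl,rfl⟩|⟨rfl,rfl⟩|⟨rfl,rfl⟩|⟨rfl,rfl⟩|⟨rfl,rfl⟩|⟨rfl,rfl⟩
    all_goals first
      | exact ⟨Or.inl (by decide), rfl⟩
      | exact ⟨Or.inr rfl, rfl⟩
  · rintro ⟨h1 | rfl, rfl⟩
    · rcases pv_nz_enum c1 h1 with rfl|rfl|rfl|rfl|rfl|rfl|rfl|rfl|rfl <;> decide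
    · decide

lemma pv_mem3 (c1 c2 c3 : Char) :
    ([c1, c2, c3] ∈ pvDigits) ↔ (pvIsNZDigit c1 = true ∧ pvIsDigit c2 = true ∧ c3 = ' ') := by
  rw [pvDigits_eq]
  constructor
  · intro h
    simp [pvBareChars] at h
    rcases h with ⟨rfl,rfl,rfl⟩|⟨rfl,rfl,rfl⟩|⟨rfl,rfl,rfl⟩|⟨rfl,rfl,rfl⟩|⟨rfl,rfl,rfl⟩|⟨rfl,rfl,rfl⟩|⟨rfl,rfl,rfl⟩|⟨rfl,rfl,rfl⟩|⟨rfl,rfl,rfl⟩|⟨rfl,rfl,rfl⟩|⟨rfl,rfl,rfl⟩|⟨rfl,rfl,rfl⟩|⟨rfl,rfl,rfl⟩|⟨rfl,rfl,rfl⟩|⟨rfl,rfl,rfl⟩|⟨rfl,rfl,rfl⟩|⟨rfl,rfl,rfl⟩|⟨rfl,rfl,rfl⟩|⟨rfl,rfl,rfl⟩|⟨rfl,rfl,rfl⟩|⟨rfl,rfl,rfl⟩|⟨rfl,rfl,rfl⟩|⟨rfl,rfl,rfl⟩|⟨rfl,rfl,rfl⟩|⟨rfl,rfl,rfl⟩|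⟨rfl,rfl,rfl⟩|⟨rfl,rfl,rfl⟩|⟨rfl,rfl,rfl⟩|⟨rfl,rfl,rfl⟩|⟨rfl,rfl,rfl⟩|⟨rfl,rfl,rfl⟩|⟨rfl,rfl,rfl⟩|⟨rfl,rfl,rfl⟩|⟨rfl,rfl,rfl⟩|⟨rfl,rfl,rfl⟩|⟨rfl,rfl,rfl⟩|⟨rfl,rfl,rfl⟩|⟨rfl,rfl,rfl⟩|⟨rfl,rfl,rfl⟩|⟨rfl,rfl,rfl⟩|⟨rfl,rfl,rfl⟩|⟨rfl,rfl,rfl⟩|⟨rfl,rfl,rfl⟩|⟨rfl,rfl,rfl⟩|⟨rfl,rfl,rfl⟩|⟨rfl,rfl,rfl⟩|⟨rfl,rfl,rfl⟩|⟨rfl,rfl,rfl⟩|⟨rfl,rfl,rfl⟩|⟨rfl,rfl,rfl⟩|⟨rfl,rfl,rfl⟩|⟨rfl,rfl,rfl⟩|⟨rfl,rfl,rfl⟩|⟨rfl,rfl,rfl⟩|⟨rfl,rfl,rfl⟩|⟨rfl,rfl,rfl⟩|⟨rfl,rfl,rfl⟩|⟨rfl,rfl,rfl⟩|⟨rfl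,rfl,rfl⟩|⟨rfl,rfl,rfl⟩|⟨rfl,rfl,rfl⟩|⟨rfl,rfl,rfl⟩|⟨rfl,rfl,rfl⟩|⟨rfl,rfl,rfl⟩|⟨rfl,rfl,rfl⟩|⟨rfl,rfl,rfl⟩|⟨rfl,rfl,rfl⟩|⟨rfl,rfl,rfl⟩|⟨rfl,rfl,rfl⟩|⟨rfl,rfl,rfl⟩|⟨rfl,rfl,rfl⟩|⟨rfl,rfl,rfl⟩|⟨rfl,rfl,rfl⟩|⟨rfl,rfl,rfl⟩|⟨rfl,rfl,rfl⟩|⟨rfl,rfl,rfl⟩|⟨rfl,rfl,rfl⟩|⟨rfl,rfl,rfl⟩|⟨rfl,rfl,rfl⟩|⟨rfl,rfl,rfl⟩|⟨rfl,rfl,rfl⟩|⟨rfl,rfl,rfl⟩|⟨rfl,rfl,rfl⟩|⟨rfl,rfl,rfl⟩|⟨rfl,rfl,rfl⟩|⟨rfl,rfl,rfl⟩|⟨rfl,rfl,rfl⟩|⟨rfl,rfl,rfl⟩|⟨rfl,rfl,rfl⟩|⟨rfl,rfl,rfl⟩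
    all_goals exact ⟨by decide, by decide, rfl⟩
  · rintro ⟨h1, h2, rfl⟩
    rcases pv_nz_enum c1 h1 with rfl|rfl|rfl|rfl|rfl|rfl|rfl|rfl|rfl <;>
      rcases pv_dg_enum c2 h2 with rfl|rfl|rfl|rfl|rfl|rfl|rfl|rfl|rfl|rfl <;> decide

lemma pv_na : pvIsNZDigit 'a' = false := by decide

lemma pv_strip_eq (cs : List Char) :
    (if PySem.List.slice cs (some 0) (some 2) ∈ pvDigits then PySem.List.slice cs (some 2) none
     else if PySem.List.slice cs (some 0) (some 3) ∈ pvDigits then PySem.List.slice cs (some 3) none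
     else cs) = pvSubPrefix cs := by
  rcases cs with _ | ⟨c1, _ | ⟨c2, _ | ⟨c3, rest2⟩⟩⟩
  · have h0 : ([] : List Char) ∉ pvDigits := fun h => by simpa using pv_len_ge [] h
    have hs2 : PySem.List.slice ([] : List Char) (some 0) (some 2) = [] := by
      simp [PySem.List.slice, PySem.List.clampIdx]
    have hs3 : PySem.List.slice ([] : List Char) (some 0) (some 3) = [] := by
      simp [PySem.List.slice, PySem.List.clampIdx]
    rw [hs2, hs3]
    simp [pvSubPrefix, h0]
  · have h1 : [c1] ∉ pvDigits := fun h => by simpa using pv_len_ge [c1] h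
    have hs2 : PySem.List.slice [c1] (some 0) (some 2) = [c1] := by
      simp [PySem.List.slice, PySem.List.clampIdx]
    have hs3 : PySem.List.slice [c1] (some 0) (some 3) = [c1] := by
      simp [PySem.List.slice, PySem.List.clampIdx]
    rw [hs2, hs3]
    simp [pvSubPrefix, h1]
  · -- cs = [c1, c2]
    have hs2 : PySem.List.slice [c1, c2] (some 0) (some 2) = [c1, c2] := by simp [PySem.List.slice, PySem.List.clampIdx]
    have hs3 : PySem.List.slice [c1, c2] (some 0) (some 3) = [c1, c2] := by simp [PySem.List.slice, PySem.List.clampIdx]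
    have hd2 : PySem.List.slice [c1, c2] (some 2) none = [] := by simp [PySem.List.slice, PySem.List.clampIdx]
    rw [hs2, hs3, hd2]
    by_cases hP : (pvIsNZDigit c1 = true ∨ c1 = 'a') ∧ c2 = ' '
    · rw [if_pos ((pv_mem2 c1 c2).mpr hP)]
      obtain ⟨h1 | rfl, rfl⟩ := hP
      · simp [pvSubPrefix, h1]
      · simp [pvSubPrefix, pv_na]
    · have hm : [c1, c2] ∉ pvDigits := fun h => hP ((pv_mem2 c1 c2).mp h)
      rw [if_neg hm, if_neg hm]
      simp only [pvSubPrefix]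
      rw [not_and] at hP
      by_cases h1 : pvIsNZDigit c1 = true
      · have hc2 : ¬ c2 = ' ' := hP (Or.inl h1)
        simp [h1, hc2]
      · by_cases ha : c1 = 'a'
        · have hc2 : ¬ c2 = ' ' := hP (Or.inr ha)
          simp [pv_na, ha, hc2]
        · simp [h1, ha]
  · -- cs = c1 :: c2 :: c3 :: rest2
    have hs2 : PySem.List.slice (c1 :: c2 :: c3 :: rest2) (some 0) (some 2) = [c1, c2] := by simp [PySem.List.slice, PySem.List.clampIdx]
    have hs3 : PySem.List.slice (c1 :: c2 :: c3 :: rest2) (some 0) (some 3) = [c1, c2, c3] := by simp [PySem.List.slice, PySem.List.clampIdx]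
    have hd2 : PySem.List.slice (c1 :: c2 :: c3 :: rest2) (some 2) none = c3 :: rest2 := by simp [PySem.List.slice, PySem.List.clampIdx]
    have hd3 : PySem.List.slice (c1 :: c2 :: c3 :: rest2) (some 3) none = rest2 := by simp [PySem.List.slice, PySem.List.clampIdx]
    rw [hs2, hs3, hd2, hd3]
    by_cases hP : (pvIsNZDigit c1 = true ∨ c1 = 'a') ∧ c2 = ' '
    · rw [if_pos ((pv_mem2 c1 c2).mpr hP)]
      obtain ⟨h1 | rfl, rfl⟩ := hP
      · have hdsp : pvIsDigit ' ' = false := by decide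
        simp [pvSubPrefix, h1, hdsp]
      · simp [pvSubPrefix, pv_na]
    · have hm2 : [c1, c2] ∉ pvDigits := fun h => hP ((pv_mem2 c1 c2).mp h)
      rw [if_neg hm2]
      rw [not_and] at hP
      by_cases hQ : pvIsNZDigit c1 = true ∧ pvIsDigit c2 = true ∧ c3 = ' '
      · rw [if_pos ((pv_mem3 c1 c2 c3).mpr hQ)]
        obtain ⟨h1, h2, rfl⟩ := hQ
        simp [pvSubPrefix, h1, h2]
      · have hm3 : [c1, c2, c3] ∉ pvDigits := fun h => hQ ((pv_mem3 c1 c2 c3).mp h)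
        rw [if_neg hm3]
        simp only [pvSubPrefix]
        by_cases h1 : pvIsNZDigit c1 = true
        · have hc2 : ¬ c2 = ' ' := hP (Or.inl h1)
          have hq : ¬ (pvIsDigit c2 = true ∧ c3 = ' ') := fun hh => hQ ⟨h1, hh⟩
          by_cases hd : pvIsDigit c2 = true
          · have hc3 : ¬ c3 = ' ' := fun hh => hq ⟨hd, hh⟩
            simp [h1, hd, hc3, hc2]
          · simp [h1, hd, hc2]
        · by_cases ha : c1 = 'a'
          · have hc2 : ¬ c2 = ' ' := hP (Or.inr ha)
            simp [pv_na, ha, hc2]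
          · simp [h1, ha]

lemma pv_tail_eq (ds : List Char) :
    (match PySem.List.pyGet? ds (-1) with
     | some c => if c = '(' then PySem.List.slice ds none (some (-1)) else ds
     | none => ds)
    = (if PySem.Chars.endswith ds ['('] then PySem.List.slice ds none (some (-1)) else ds) := by
  rcases List.eq_nil_or_concat ds with rfl | ⟨es, e, rfl⟩
  · decide
  · rw [List.concat_eq_append] at *
    rw [PySem.List.pyGet?_neg_one_append_singleton]
    by_cases he : e = '('
    · subst he
      rw [if_pos ((PySem.Chars.endswith_iff _ _).mpr ⟨es, rfl⟩)]
      simp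
    · have hfalse : PySem.Chars.endswith (es ++ [e]) ['('] = false := by
        apply Bool.eq_false_iff.mpr; intro htrue
        obtain ⟨t, ht⟩ := (PySem.Chars.endswith_iff _ _).mp htrue
        have h2 := congrArg List.getLast? ht
        simp at h2
        exact he h2.symm
      simp [hfalse, he]

lemma pv_step_eq (met : String) : pvStepA met = pvStepB met := by
  simp only [pvStepA, pvStepB]
  rw [pv_strip_eq, pv_tail_eq]

-- ===== VERDICT (by name: the statement is the Claim_ definition above) =====
theorem process_metabolites_spec : Claim_equal_process_metabolites := by
  intro l _ _
  unfold Spec_process_metabolites process_metabolites process_metabolites_alt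
  exact List.map_congr_left (fun met _ => pv_step_eq met)
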